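-- pv_equiv track=rewrite | github.com/Seyfdata/Trading-agent | dashboard/api.py | _news_map_from_lists
-- ===== SOURCE A (Python) =====
-- def _news_map_from_lists(ticker_news: list, keyword_news: list) -> dict:
--     """Construit {ticker: {ticker_matches, keyword_matches}} depuis les listes de news."""
--     result = {}
--     for news in ticker_news:
--         for t in news.get("matched_tickers", []):
--             entry = result.setdefault(t, {"ticker_matches": 0, "keyword_matches": 0})
--             entry["ticker_matches"] += 1
--     for news in keyword_news:
--         for t in news.get("matched_tickers", []):
--             entry = result.setdefault(t, {"ticker_matches": 0, "keyword_matches": 0})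
--             entry["keyword_matches"] += 1
--     return result
-- ===== SOURCE B (Python) =====
-- def _news_map_from_lists(ticker_news: list, keyword_news: list) -> dict:
--     """Tally-then-merge: two flat counters, then one merge pass over the union of keys."""
--     c1 = {}
--     for news in ticker_news:
--         for t in news.get("matched_tickers", []):
--             c1[t] = c1.get(t, 0) + 1
--     c2 = {}
--     for news in keyword_news:
--         for t in news.get("matched_tickers", []):
--             c2[t] = c2.get(t, 0) + 1
--     order = list(c1) + [t for t in c2 if t not in c1]
--     return {t: {"ticker_matches": c1.get(t, 0), "keyword_matches": c2.get(t, 0)}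
--             for t in order}
-- ===== Notes on version B (the rewrite author's own statement) =====
-- stated objective: alternative
-- what changed: A increments nested per-ticker dicts in place via setdefault while scanning both lists; B first builds two flat counters (one per list) and then constructs the result in a single merge pass over the union of their keys.
import Mathlib
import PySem

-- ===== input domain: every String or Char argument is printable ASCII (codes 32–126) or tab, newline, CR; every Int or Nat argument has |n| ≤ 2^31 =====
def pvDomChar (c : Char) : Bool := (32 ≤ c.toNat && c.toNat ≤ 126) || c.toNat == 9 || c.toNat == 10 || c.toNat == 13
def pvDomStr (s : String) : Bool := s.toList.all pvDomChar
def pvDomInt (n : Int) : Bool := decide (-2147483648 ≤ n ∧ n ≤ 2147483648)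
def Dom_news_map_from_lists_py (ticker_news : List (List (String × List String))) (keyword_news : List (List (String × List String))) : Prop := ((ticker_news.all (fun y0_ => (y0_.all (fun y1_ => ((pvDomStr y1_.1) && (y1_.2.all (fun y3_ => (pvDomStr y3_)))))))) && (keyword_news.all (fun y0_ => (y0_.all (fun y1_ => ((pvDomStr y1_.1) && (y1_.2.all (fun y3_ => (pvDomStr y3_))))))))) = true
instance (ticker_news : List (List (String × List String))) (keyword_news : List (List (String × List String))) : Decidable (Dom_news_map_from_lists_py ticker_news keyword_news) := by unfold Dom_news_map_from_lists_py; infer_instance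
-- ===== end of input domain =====

-- B replaces A's in-place setdefault-incrementing of nested dicts by two flat counters merged in one final pass (alternative decomposition, same cost).


-- ===== PORT A =====
-- news.get("matched_tickers", [])
def pvGetMT (news : List (String × List String)) : List String :=
  PySem.Dict.getD (PySem.Dict.mk news) "matched_tickers" []

-- the default inner dict {"ticker_matches": 0, "keyword_matches": 0}
def pvD0 : PySem.Dict String Int :=
  PySem.Dict.mk [("ticker_matches", 0), ("keyword_matches", 0)]

-- entry = result.setdefault(t, {...}); entry[field] += 1  (entry is a reference into result)
def pvStepA (field : String) (r : PySem.Dict String (PySem.Dict String Int)) (t : String) :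
    PySem.Dict String (PySem.Dict String Int) :=
  let r1 := r.setdefault t pvD0
  let entry := r1.getD t pvD0
  r1.insert t (entry.modify field 0 (· + 1))

def news_map_from_lists_py (ticker_news : List (List (String × List String))) (keyword_news : List (List (String × List String))) : List (String × List (String × Int)) :=
  let result : PySem.Dict String (PySem.Dict String Int) := PySem.Dict.empty
  let result := ticker_news.foldl (fun r news => (pvGetMT news).foldl (pvStepA "ticker_matches") r) result
  let result := keyword_news.foldl (fun r news => (pvGetMT news).foldl (pvStepA "keyword_matches") r) result
  result.items.map (fun p => (p.1, p.2.items))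

-- ===== PORT B =====
-- c[t] = c.get(t, 0) + 1 over all matched tickers of a news list
def pvTally (newsList : List (List (String × List String))) : PySem.Dict String Int :=
  newsList.foldl (fun c news => (pvGetMT news).foldl (fun c t => c.insert t (c.getD t 0 + 1)) c) PySem.Dict.empty

def news_map_from_lists_py_alt (ticker_news : List (List (String × List String))) (keyword_news : List (List (String × List String))) : List (String × List (String × Int)) :=
  let c1 := pvTally ticker_news
  let c2 := pvTally keyword_news
  let order := c1.keys ++ c2.keys.filter (fun t => !(c1.contains t))
  order.map (fun t => (t, [("ticker_matches", c1.getD t 0), ("keyword_matches", c2.getD t 0)]))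

-- ===== PRECONDITION & SPEC =====
def Spec_news_map_from_lists_py (ticker_news : List (List (String × List String))) (keyword_news : List (List (String × List String))) (out : List (String × List (String × Int))) : Prop := out = news_map_from_lists_py_alt ticker_news keyword_news
instance (ticker_news : List (List (String × List String))) (keyword_news : List (List (String × List String))) (out : List (String × List (String × Int))) : Decidable (Spec_news_map_from_lists_py ticker_news keyword_news out) := by unfold Spec_news_map_from_lists_py; infer_instance

-- ===== CLAIM (what is proved, stated in full; the proofs are below) =====
def Claim_equal_news_map_from_lists_py : Prop := ∀ (ticker_news : List (List (String × List String))) (keyword_news : List (List (String × List String))), Dom_news_map_from_lists_py ticker_news keyword_news → Spec_news_map_from_lists_py ticker_news keyword_news (news_map_from_lists_py ticker_news keyword_news)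

-- ===== LEMMAS AND PROOFS =====

-- merged shape of A's outer dict: counters c1 (ticker phase) and c2 (keyword phase so far)
def pvShape (c1 c2 : PySem.Dict String Int) : PySem.Dict String (PySem.Dict String Int) :=
  PySem.Dict.mk
    (c1.items.map (fun p => (p.1, PySem.Dict.mk [("ticker_matches", p.2), ("keyword_matches", c2.getD p.1 0)]))
     ++ (c2.items.filter (fun p => !(c1.contains p.1))).map
          (fun p => (p.1, PySem.Dict.mk [("ticker_matches", 0), ("keyword_matches", p.2)])))

-- nested loop over news items = loop over the flattened ticker list
theorem pv_foldl_nested {α : Type} (step : α → String → α) :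
    ∀ (L : List (List (String × List String))) (r : α),
      L.foldl (fun r news => (pvGetMT news).foldl step r) r = (L.flatMap pvGetMT).foldl step r := by
  intro L
  induction L with
  | nil => intro r; rfl
  | cons n L ih => intro r; simp [List.flatMap_cons, List.foldl_append, ih]

theorem pv_get?_mk_append {ν : Type} (l1 l2 : List (String × ν)) (t : String) :
    (PySem.Dict.mk (l1 ++ l2)).get? t = ((PySem.Dict.mk l1).get? t).or ((PySem.Dict.mk l2).get? t) := by
  induction l1 with
  | nil => simp [PySem.Dict.get?]
  | cons p l ih => obtain ⟨k,v⟩ := p; simp [PySem.Dict.get?_mk_cons, ih]; split <;> simp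

theorem pv_get?_mk_map {ν ν' : Type} (l : List (String × ν)) (g : String → ν → ν') (t : String) :
    (PySem.Dict.mk (l.map (fun p => (p.1, g p.1 p.2)))).get? t = ((PySem.Dict.mk l).get? t).map (g t) := by
  induction l with
  | nil => simp [PySem.Dict.get?]
  | cons p l ih =>
    obtain ⟨k,v⟩ := p
    simp only [List.map_cons, PySem.Dict.get?_mk_cons]
    by_cases h : k == t
    · simp [h, eq_of_beq h]
    · simp [h, ih]

theorem pv_get?_mk_filter {ν : Type} (l : List (String × ν)) (q : String → Bool) (t : String) :
    (PySem.Dict.mk (l.filter (fun p => q p.1))).get? t = if q t then (PySem.Dict.mk l).get? t else none := by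
  induction l with
  | nil => simp [PySem.Dict.get?]
  | cons p l ih =>
    obtain ⟨k,v⟩ := p
    by_cases h : k == t
    · have hkt := eq_of_beq h; subst hkt
      by_cases hq : q k <;> simp [List.filter_cons, hq, PySem.Dict.get?_mk_cons, ih]
    · by_cases hq : q k <;> simp [List.filter_cons, hq, PySem.Dict.get?_mk_cons, h, ih]

theorem pv_shape_get?_pos (c1 c2 : PySem.Dict String Int) (t : String) (n : Int) (h : c1.get? t = some n) :
    (pvShape c1 c2).get? t = some (PySem.Dict.mk [("ticker_matches", n), ("keyword_matches", c2.getD t 0)]) := by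
  unfold pvShape
  rw [pv_get?_mk_append,
      pv_get?_mk_map c1.items (fun k v => PySem.Dict.mk [("ticker_matches", v), ("keyword_matches", c2.getD k 0)]) t]
  simp [h]

theorem pv_shape_get?_neg (c1 c2 : PySem.Dict String Int) (t : String) (h : c1.get? t = none) :
    (pvShape c1 c2).get? t = (c2.get? t).map (fun m => PySem.Dict.mk [("ticker_matches", (0:Int)), ("keyword_matches", m)]) := by
  unfold pvShape
  rw [pv_get?_mk_append,
      pv_get?_mk_map c1.items (fun k v => PySem.Dict.mk [("ticker_matches", v), ("keyword_matches", c2.getD k 0)]) t,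
      pv_get?_mk_map (c2.items.filter (fun p => !(c1.contains p.1))) (fun k v => PySem.Dict.mk [("ticker_matches", (0:Int)), ("keyword_matches", v)]) t,
      pv_get?_mk_filter c2.items (fun k => !(c1.contains k)) t]
  have hc : c1.contains t = false := by
    rw [PySem.Dict.contains_eq_isSome_get?, h]; rfl
  simp [h, hc]

theorem pv_mod_km (a b : Int) :
    (PySem.Dict.mk [("ticker_matches", a), ("keyword_matches", b)]).modify "keyword_matches" 0 (· + 1)
      = PySem.Dict.mk [("ticker_matches", a), ("keyword_matches", b + 1)] := rfl

theorem pv_mod_tm (a b : Int) :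
    (PySem.Dict.mk [("ticker_matches", a), ("keyword_matches", b)]).modify "ticker_matches" 0 (· + 1)
      = PySem.Dict.mk [("ticker_matches", a + 1), ("keyword_matches", b)] := rfl


theorem pv_ne_of_mem_keys (c : PySem.Dict String Int) (t k : String) (hc : c.contains t = false)
    (hk : k ∈ c.keys) : k ≠ t := by
  intro h; subst h
  rw [(PySem.Dict.contains_iff_mem_keys _ _).2 hk] at hc; cases hc

theorem pv_phase2_step (c1 c2 : PySem.Dict String Int) (h1 : c1.keys.Nodup) (h2 : c2.keys.Nodup) (t : String) :
    (pvShape c1 c2).insert t (((pvShape c1 c2).getD t pvD0).modify "keyword_matches" 0 (· + 1))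
      = pvShape c1 (c2.insert t (c2.getD t 0 + 1)) := by
  apply PySem.Dict.ext
  rcases hc1 : c1.get? t with _ | n
  · have hcont1 : c1.contains t = false := by rw [PySem.Dict.contains_eq_isSome_get?, hc1]; rfl
    have hSget := pv_shape_get?_neg c1 c2 t hc1
    rcases hc2 : c2.get? t with _ | m
    · -- fresh key: appended on both sides
      have hcont2 : c2.contains t = false := by rw [PySem.Dict.contains_eq_isSome_get?, hc2]; rfl
      have hSnone : (pvShape c1 c2).get? t = none := by rw [hSget, hc2]; rfl
      have hScont : (pvShape c1 c2).contains t = false := by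
        rw [PySem.Dict.contains_eq_isSome_get?, hSnone]; rfl
      have hgd : (pvShape c1 c2).getD t pvD0 = pvD0 := by
        rw [PySem.Dict.getD_eq_get?_getD, hSnone]; rfl
      have hgd2 : c2.getD t 0 = 0 := by rw [PySem.Dict.getD_eq_get?_getD, hc2]; rfl
      rw [PySem.Dict.items_insert_of_not_contains _ _ hScont, hgd, hgd2]
      have hmod : pvD0.modify "keyword_matches" 0 (· + 1)
          = PySem.Dict.mk [("ticker_matches", (0:Int)), ("keyword_matches", (0:Int) + 1)] := rfl
      rw [hmod]
      conv_rhs => rw [pvShape]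
      rw [PySem.Dict.items_insert_of_not_contains _ _ hcont2, List.filter_append, List.map_append]
      have hpred : (List.filter (fun p => !c1.contains p.1) [(t, (0:Int) + 1)]) = [(t, (0:Int)+1)] := by
        simp [hcont1]
      rw [hpred]
      have hM1 : c1.items.map (fun p => (p.1, PySem.Dict.mk [("ticker_matches", p.2), ("keyword_matches", (c2.insert t (0+1)).getD p.1 0)]))
          = c1.items.map (fun p => (p.1, PySem.Dict.mk [("ticker_matches", p.2), ("keyword_matches", c2.getD p.1 0)])) := by
        apply List.map_congr_left
        intro p hp
        have : p.1 ≠ t := pv_ne_of_mem_keys c1 t p.1 hcont1 (List.mem_map_of_mem hp)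
        rw [PySem.Dict.getD_insert_of_ne _ _ _ this]
      rw [hM1]
      show (_ ++ _) ++ _ = _ ++ (_ ++ _)
      rw [List.append_assoc]
      rfl
    · -- t in c2 only: replace inside the second segment
      have hcont2 : c2.contains t = true := by rw [PySem.Dict.contains_eq_isSome_get?, hc2]; rfl
      have hSome : (pvShape c1 c2).get? t
          = some (PySem.Dict.mk [("ticker_matches", (0:Int)), ("keyword_matches", m)]) := by
        rw [hSget, hc2]; rfl
      have hScont : (pvShape c1 c2).contains t = true := by
        rw [PySem.Dict.contains_eq_isSome_get?, hSome]; rfl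
      have hgd : (pvShape c1 c2).getD t pvD0
          = PySem.Dict.mk [("ticker_matches", (0:Int)), ("keyword_matches", m)] := by
        rw [PySem.Dict.getD_eq_get?_getD, hSome]; rfl
      have hgd2 : c2.getD t 0 = m := by rw [PySem.Dict.getD_eq_get?_getD, hc2]; rfl
      rw [hgd, pv_mod_km, hgd2, PySem.Dict.items_insert_of_contains _ _ hScont]
      conv_rhs => rw [pvShape]
      rw [PySem.Dict.items_insert_of_contains _ _ hcont2]
      conv_lhs => rw [pvShape]
      show (List.map _ (_ ++ _)) = _
      rw [List.map_append, List.map_map, List.map_map]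
      congr 1
      · apply List.map_congr_left
        intro p hp
        have hne : p.1 ≠ t := pv_ne_of_mem_keys c1 t p.1 hcont1 (List.mem_map_of_mem hp)
        simp only [Function.comp_apply]
        rw [if_neg (by simpa using hne), PySem.Dict.getD_insert_of_ne _ _ _ hne]
      · rw [List.filter_map]
        have hfc : List.filter ((fun p => !c1.contains p.1) ∘ fun p => if (p.1 == t) = true then (t, m + 1) else p) c2.items
            = List.filter (fun p => !c1.contains p.1) c2.items := by
          apply List.filter_congr
          intro p hp
          by_cases h : (p.1 == t) = true
          · simp [eq_of_beq h]
          · simp only [Function.comp_apply, if_neg h]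
        rw [hfc, List.map_map]
        apply List.map_congr_left
        intro p hp
        have hpf := List.of_mem_filter hp
        have hpm := List.mem_of_mem_filter hp
        simp only [Function.comp_apply]
        by_cases h : (p.1 == t) = true
        · have hpt := eq_of_beq h
          have hpv : p.2 = m := by
            have : c2.get? p.1 = some p.2 := PySem.Dict.get?_of_mem_items _ hpm h2
            rw [hpt, hc2] at this; exact (Option.some_inj.1 this).symm
          simp [h, hpv, eq_of_beq h]
        · rw [if_neg h, if_neg h]
  · -- t in c1: replace inside the first segment
    have hcont1 : c1.contains t = true := by rw [PySem.Dict.contains_eq_isSome_get?, hc1]; rfl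
    have hSome := pv_shape_get?_pos c1 c2 t n hc1
    have hScont : (pvShape c1 c2).contains t = true := by
      rw [PySem.Dict.contains_eq_isSome_get?, hSome]; rfl
    have hgd : (pvShape c1 c2).getD t pvD0
        = PySem.Dict.mk [("ticker_matches", n), ("keyword_matches", c2.getD t 0)] := by
      rw [PySem.Dict.getD_eq_get?_getD, hSome]; rfl
    rw [hgd, pv_mod_km, PySem.Dict.items_insert_of_contains _ _ hScont]
    conv_rhs => rw [pvShape]
    conv_lhs => rw [pvShape]
    show (List.map _ (_ ++ _)) = _
    rw [List.map_append, List.map_map]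
    congr 1
    · apply List.map_congr_left
      intro p hp
      simp only [Function.comp_apply]
      by_cases h : (p.1 == t) = true
      · have hpt := eq_of_beq h
        have hpv : p.2 = n := by
          have : c1.get? p.1 = some p.2 := PySem.Dict.get?_of_mem_items _ hp h1
          rw [hpt, hc1] at this; exact (Option.some_inj.1 this).symm
        rw [if_pos h, hpt, hpv, PySem.Dict.getD_insert_self]
      · have hne : p.1 ≠ t := by simpa using h
        rw [if_neg h, PySem.Dict.getD_insert_of_ne _ _ _ hne]
    · -- second segment untouched
      have hLHS : List.map (fun p => if (p.1 == t) = true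
            then (t, PySem.Dict.mk [("ticker_matches", n), ("keyword_matches", c2.getD t 0 + 1)]) else p)
            (List.map (fun p => (p.1, PySem.Dict.mk [("ticker_matches", (0:Int)), ("keyword_matches", p.2)]))
              (List.filter (fun p => !c1.contains p.1) c2.items))
          = List.map (fun p => (p.1, PySem.Dict.mk [("ticker_matches", (0:Int)), ("keyword_matches", p.2)]))
              (List.filter (fun p => !c1.contains p.1) c2.items) := by
        rw [List.map_map]
        apply List.map_congr_left
        intro p hp
        have hpf := List.of_mem_filter hp
        have hne : ¬ (p.1 == t) = true := by
          intro h
          rw [eq_of_beq h, hcont1] at hpf; simp at hpf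
        simp only [Function.comp_apply, if_neg hne]
      rw [hLHS]
      rcases hc2c : c2.contains t with _ | _
      · rw [PySem.Dict.items_insert_of_not_contains _ _ hc2c, List.filter_append]
        have : List.filter (fun p => !c1.contains p.1) [(t, c2.getD t 0 + 1)] = [] := by
          simp [hcont1]
        rw [this, List.append_nil]
      · rw [PySem.Dict.items_insert_of_contains _ _ hc2c, List.filter_map]
        have hfc : List.filter ((fun p => !c1.contains p.1) ∘ fun p => if (p.1 == t) = true then (t, c2.getD t 0 + 1) else p) c2.items
            = List.filter (fun p => !c1.contains p.1) c2.items := by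
          apply List.filter_congr
          intro p hp
          by_cases h : (p.1 == t) = true
          · simp [eq_of_beq h]
          · simp only [Function.comp_apply, if_neg h]
        rw [hfc, List.map_map]
        apply List.map_congr_left
        intro p hp
        have hpf := List.of_mem_filter hp
        have hne : ¬ (p.1 == t) = true := by
          intro h
          rw [eq_of_beq h, hcont1] at hpf; simp at hpf
        simp only [Function.comp_apply, if_neg hne]

theorem pv_phase1_step (c : PySem.Dict String Int) (h1 : c.keys.Nodup) (t : String) :
    (pvShape c PySem.Dict.empty).insert t
        (((pvShape c PySem.Dict.empty).getD t pvD0).modify "ticker_matches" 0 (· + 1))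
      = pvShape (c.insert t (c.getD t 0 + 1)) PySem.Dict.empty := by
  apply PySem.Dict.ext
  have h0 : ∀ k : String, (PySem.Dict.empty : PySem.Dict String Int).getD k 0 = 0 := fun _ => rfl
  rcases hc1 : c.get? t with _ | n
  · -- fresh key: appended
    have hcont1 : c.contains t = false := by rw [PySem.Dict.contains_eq_isSome_get?, hc1]; rfl
    have hgd2 : c.getD t 0 = 0 := by rw [PySem.Dict.getD_eq_get?_getD, hc1]; rfl
    have hSnone : (pvShape c PySem.Dict.empty).get? t = none := by
      rw [pv_shape_get?_neg c PySem.Dict.empty t hc1]; rfl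
    have hScont : (pvShape c PySem.Dict.empty).contains t = false := by
      rw [PySem.Dict.contains_eq_isSome_get?, hSnone]; rfl
    have hgd : (pvShape c PySem.Dict.empty).getD t pvD0 = pvD0 := by
      rw [PySem.Dict.getD_eq_get?_getD, hSnone]; rfl
    rw [PySem.Dict.items_insert_of_not_contains _ _ hScont, hgd, hgd2]
    have hmod : pvD0.modify "ticker_matches" 0 (· + 1)
        = PySem.Dict.mk [("ticker_matches", (0:Int) + 1), ("keyword_matches", (0:Int))] := rfl
    rw [hmod]
    conv_rhs => rw [pvShape]
    rw [PySem.Dict.items_insert_of_not_contains _ _ hcont1, List.map_append]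
    conv_lhs => rw [pvShape]
    simp [h0, PySem.Dict.empty, PySem.Dict.getD, PySem.Dict.get?]
  · -- t already counted: replace in place
    have hcont1 : c.contains t = true := by rw [PySem.Dict.contains_eq_isSome_get?, hc1]; rfl
    have hgd2 : c.getD t 0 = n := by rw [PySem.Dict.getD_eq_get?_getD, hc1]; rfl
    have hSome := pv_shape_get?_pos c PySem.Dict.empty t n hc1
    have hScont : (pvShape c PySem.Dict.empty).contains t = true := by
      rw [PySem.Dict.contains_eq_isSome_get?, hSome]; rfl
    have hgd : (pvShape c PySem.Dict.empty).getD t pvD0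
        = PySem.Dict.mk [("ticker_matches", n), ("keyword_matches", (0:Int))] := by
      rw [PySem.Dict.getD_eq_get?_getD, hSome]; rfl
    rw [hgd, pv_mod_tm, PySem.Dict.items_insert_of_contains _ _ hScont, hgd2]
    conv_rhs => rw [pvShape]
    rw [PySem.Dict.items_insert_of_contains _ _ hcont1]
    conv_lhs => rw [pvShape]
    show (List.map _ (_ ++ _)) = _
    rw [List.map_append]
    congr 1
    · rw [List.map_map, List.map_map]
      apply List.map_congr_left
      intro p hp
      simp only [Function.comp_apply]
      by_cases h : (p.1 == t) = true
      · have hpt := eq_of_beq h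
        have hpv : p.2 = n := by
          have : c.get? p.1 = some p.2 := PySem.Dict.get?_of_mem_items _ hp h1
          rw [hpt, hc1] at this; exact (Option.some_inj.1 this).symm
        simp [h, hpv, eq_of_beq h, h0]
      · simp only [if_neg h]

theorem pvStepA_eq (field : String) (r : PySem.Dict String (PySem.Dict String Int)) (t : String) :
    pvStepA field r t = r.insert t ((r.getD t pvD0).modify field 0 (· + 1)) := by
  unfold pvStepA
  show (r.setdefault t pvD0).insert t (((r.setdefault t pvD0).getD t pvD0).modify field 0 (· + 1)) = _
  by_cases h : r.contains t = true
  · rw [PySem.Dict.setdefault_of_contains _ _ h]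
  · rw [PySem.Dict.setdefault_of_not_contains _ _ (by simpa using h)]
    rw [PySem.Dict.getD_insert_self, PySem.Dict.insert_insert_self,
        PySem.Dict.getD_of_not_contains _ _ (by simpa using h)]

theorem pv_phase1_aux (T : List String) :
    ∀ c : PySem.Dict String Int, c.keys.Nodup →
    T.foldl (fun r t => r.insert t ((r.getD t pvD0).modify "ticker_matches" 0 (· + 1))) (pvShape c PySem.Dict.empty)
      = pvShape (T.foldl (fun c t => c.insert t (c.getD t 0 + 1)) c) PySem.Dict.empty := by
  induction T with
  | nil => intro c _; rfl
  | cons t T ih =>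
    intro c hc
    rw [List.foldl_cons, List.foldl_cons, pv_phase1_step c hc t,
        ih _ (PySem.Dict.nodup_keys_insert _ _ _ hc)]

theorem pv_phase2_aux (c1 : PySem.Dict String Int) (h1 : c1.keys.Nodup) (K : List String) :
    ∀ c2 : PySem.Dict String Int, c2.keys.Nodup →
    K.foldl (fun r t => r.insert t ((r.getD t pvD0).modify "keyword_matches" 0 (· + 1))) (pvShape c1 c2)
      = pvShape c1 (K.foldl (fun c t => c.insert t (c.getD t 0 + 1)) c2) := by
  induction K with
  | nil => intro c2 _; rfl
  | cons t K ih =>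
    intro c2 hc2
    rw [List.foldl_cons, List.foldl_cons, pv_phase2_step c1 c2 h1 hc2 t,
        ih _ (PySem.Dict.nodup_keys_insert _ _ _ hc2)]

theorem pv_final (c1 c2 : PySem.Dict String Int) (h1 : c1.keys.Nodup) (h2 : c2.keys.Nodup) :
    (pvShape c1 c2).items.map (fun p => (p.1, p.2.items))
      = (c1.keys ++ c2.keys.filter (fun t => !(c1.contains t))).map
          (fun t => (t, [("ticker_matches", c1.getD t 0), ("keyword_matches", c2.getD t 0)])) := by
  rw [pvShape, List.map_append, List.map_append]
  congr 1
  · conv_lhs => rw [PySem.Dict.items_eq_map_keys c1 h1 0]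
    rw [List.map_map, List.map_map]
    apply List.map_congr_left
    intro k hk
    rfl
  · conv_lhs => rw [PySem.Dict.items_eq_map_keys c2 h2 0]
    rw [List.filter_map, List.map_map, List.map_map]
    have hfc : List.filter ((fun p => !c1.contains p.1) ∘ fun k => (k, c2.getD k 0)) c2.keys
        = List.filter (fun t => !c1.contains t) c2.keys := by
      apply List.filter_congr; intro k _; rfl
    rw [hfc]
    apply List.map_congr_left
    intro k hk
    have hnc : c1.contains k = false := by
      have := List.of_mem_filter hk; simpa using this
    simp only [Function.comp_apply]
    rw [PySem.Dict.getD_of_not_contains _ _ hnc]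


theorem pvStepA_eq_fun (field : String) :
    pvStepA field = fun r t => r.insert t ((r.getD t pvD0).modify field 0 (· + 1)) :=
  funext fun r => funext fun t => pvStepA_eq field r t

-- ===== VERDICT (by name: the statement is the Claim_ definition above) =====
theorem news_map_from_lists_py_spec : Claim_equal_news_map_from_lists_py := by
  intro tn kn _
  unfold Spec_news_map_from_lists_py news_map_from_lists_py news_map_from_lists_py_alt pvTally
  simp only [pv_foldl_nested, pvStepA_eq_fun]
  have hstart : pvShape PySem.Dict.empty PySem.Dict.empty = (PySem.Dict.empty : PySem.Dict String (PySem.Dict String Int)) := rfl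
  rw [← hstart, pv_phase1_aux (tn.flatMap pvGetMT) PySem.Dict.empty (by simp [PySem.Dict.empty, PySem.Dict.keys])]
  have h1 : ((tn.flatMap pvGetMT).foldl (fun c t => c.insert t (c.getD t 0 + 1)) (PySem.Dict.empty : PySem.Dict String Int)).keys.Nodup := by
    rw [PySem.Dict.foldl_insert_getD_add_one_eq_counter]
    exact PySem.Dict.nodup_keys_counter _
  have h2 : ((kn.flatMap pvGetMT).foldl (fun c t => c.insert t (c.getD t 0 + 1)) (PySem.Dict.empty : PySem.Dict String Int)).keys.Nodup := by
    rw [PySem.Dict.foldl_insert_getD_add_one_eq_counter]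
    exact PySem.Dict.nodup_keys_counter _
  rw [pv_phase2_aux _ h1 (kn.flatMap pvGetMT) PySem.Dict.empty (by simp [PySem.Dict.empty, PySem.Dict.keys])]
  rw [pv_final _ _ h1 h2]
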